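-- pv_equiv track=rewrite | github.com/chemag/vinfo | vinfo.py | aggregate_list_by_frame_number
-- ===== SOURCE A (Python) =====
-- def aggregate_list_by_frame_number(in_list, field, period):
--     # 1. calculate output data
--     frame_list = []
--     last_agg_value = None
--     cum_frames = 0
--     cum_bytes = 0
--     for in_info in in_list:
--         if last_agg_value is None:
--             last_agg_value = int(in_info[field])
--         if int(in_info[field]) >= (last_agg_value + period):
--             # dump value
--             frame_info = {
--                 field: last_agg_value,
--                 'num_frames': cum_frames,
--                 'pkt_size': cum_bytes,
--             }
--             frame_list.append(frame_info)
--             cum_frames = 0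
--             cum_bytes = 0
--             # insert zeroes where no data is present
--             delta_number = int(in_info[field]) - last_agg_value
--             zero_elements = int((delta_number - period) / period)
--             for _i in range(zero_elements):
--                 last_agg_value += period
--                 frame_info = {
--                     field: last_agg_value,
--                     'num_frames': 0,
--                     'pkt_size': 0,
--                 }
--                 frame_list.append(frame_info)
--             last_agg_value += period
--         # account for current packet
--         cum_frames += 1
--         cum_bytes += int(in_info['pkt_size'])
--     # flush data
--     if cum_frames > 0:
--         frame_info = {
--             field: last_agg_value,
--             'num_frames': cum_frames,
--             'pkt_size': cum_bytes,
--         }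
--         frame_list.append(frame_info)
--     return frame_list
-- ===== SOURCE B (Python) =====
-- def aggregate_list_by_frame_number(in_list, field, period):
--     # Pass 1: group consecutive records into period-wide buckets.
--     buckets = []  # (bucket_start, num_frames, total_bytes)
--     start = None
--     frames = 0
--     size = 0
--     for rec in in_list:
--         value = int(rec[field])
--         if start is None:
--             start = value
--         elif value >= start + period:
--             buckets.append((start, frames, size))
--             start += period * ((value - start) // period)
--             frames = 0
--             size = 0
--         frames += 1
--         size += int(rec['pkt_size'])
--     if frames > 0:
--         buckets.append((start, frames, size))
--     # Pass 2: render the buckets, zero-filling the gaps between consecutive starts.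
--     out = []
--     for (s, nf, nb), (nxt, _, _) in zip(buckets, buckets[1:]):
--         out.append({field: s, 'num_frames': nf, 'pkt_size': nb})
--         for k in range(1, (nxt - s) // period):
--             out.append({field: s + period * k, 'num_frames': 0, 'pkt_size': 0})
--     if buckets:
--         s, nf, nb = buckets[-1]
--         out.append({field: s, 'num_frames': nf, 'pkt_size': nb})
--     return out
-- ===== Notes on version B (the rewrite author's own statement) =====
-- stated objective: alternative
-- what changed: A's single streaming loop with a nested zero-emitting loop is decomposed into two sequential passes: pass 1 only groups records into buckets (start, num_frames, bytes) and advances the start to the largest bucket boundary not above the new value, pass 2 renders the buckets and reconstructs the zero-filled gap buckets from the difference of consecutive bucket starts divided by period; …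
import Mathlib
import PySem

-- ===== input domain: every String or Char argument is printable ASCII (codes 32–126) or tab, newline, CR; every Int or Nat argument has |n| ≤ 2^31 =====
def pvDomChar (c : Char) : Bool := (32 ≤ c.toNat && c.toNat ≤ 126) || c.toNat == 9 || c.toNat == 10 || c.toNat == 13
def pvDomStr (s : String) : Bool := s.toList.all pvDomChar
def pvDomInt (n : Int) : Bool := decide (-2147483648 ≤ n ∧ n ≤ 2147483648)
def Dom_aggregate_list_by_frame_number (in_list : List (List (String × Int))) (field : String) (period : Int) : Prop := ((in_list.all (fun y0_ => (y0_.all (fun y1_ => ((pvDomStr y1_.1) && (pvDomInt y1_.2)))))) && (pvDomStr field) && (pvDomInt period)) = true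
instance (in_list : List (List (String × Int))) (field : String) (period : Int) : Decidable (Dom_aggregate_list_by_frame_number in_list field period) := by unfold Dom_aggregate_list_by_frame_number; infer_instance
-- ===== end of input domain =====

-- ===== PORT A =====
-- B restructures A's single loop with an inner zero-fill loop into two passes:
-- pass 1 groups records into buckets, pass 2 zero-fills gaps between bucket
-- starts (objective: alternative decomposition; equal cost).

-- in_info[k]: first matching key of the association list; a missing key is a
-- Python KeyError (excluded by Pre_), the 0 default is never reached there
def pvKeyA (r : List (String × Int)) (k : String) : Int :=
  ((r.find? (fun q => q.1 == k)).map Prod.snd).getD 0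

-- the dict literal {field: v, 'num_frames': nf, 'pkt_size': pb}
def pvFrameA (field : String) (v nf pb : Int) : List (String × Int) :=
  (((PySem.Dict.empty.insert field v).insert "num_frames" nf).insert "pkt_size" pb).items

-- one iteration of A's loop; state = (frame_list, last_agg_value, cum_frames, cum_bytes)
def pvStepA (field : String) (period : Int)
    (st : List (List (String × Int)) × Option Int × Int × Int)
    (rec : List (String × Int)) : List (List (String × Int)) × Option Int × Int × Int :=
  let v := pvKeyA rec field
  let last := st.2.1.getD v          -- if last_agg_value is None: last_agg_value = int(in_info[field])
  let st' : List (List (String × Int)) × Int × Int × Int :=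
    if last + period ≤ v then
      let frames := st.1 ++ [pvFrameA field last st.2.2.1 st.2.2.2]
      let delta := v - last
      -- int((delta_number - period) / period): exact trunc division on |n| ≤ 2^33
      let ze := PySem.Int.truncdiv (delta - period) period
      let q := (PySem.List.pyRange 0 ze 1).foldl
        (fun (q : List (List (String × Int)) × Int) _ =>
          (q.1 ++ [pvFrameA field (q.2 + period) 0 0], q.2 + period)) (frames, last)
      (q.1, q.2 + period, 0, 0)
    else (st.1, last, st.2.2.1, st.2.2.2)
  (st'.1, some st'.2.1, st'.2.2.1 + 1, st'.2.2.2 + pvKeyA rec "pkt_size")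

def aggregate_list_by_frame_number (in_list : List (List (String × Int))) (field : String) (period : Int) : List (List (String × Int)) :=
  let st := in_list.foldl (pvStepA field period) ([], none, 0, 0)
  if 0 < st.2.2.1 then st.1 ++ [pvFrameA field (st.2.1.getD 0) st.2.2.1 st.2.2.2] else st.1

-- ===== PORT B =====
-- rec[k], as in Source B (missing key = KeyError, excluded by Pre_)
def pvKeyB (r : List (String × Int)) (k : String) : Int :=
  ((r.find? (fun q => q.1 == k)).map Prod.snd).getD 0

-- the dict literal {field: v, 'num_frames': nf, 'pkt_size': pb}
def pvFrameB (field : String) (v nf pb : Int) : List (String × Int) :=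
  (((PySem.Dict.empty.insert field v).insert "num_frames" nf).insert "pkt_size" pb).items

-- pass 1, one iteration; state = (buckets, start, frames, size)
def pvStep1B (field : String) (period : Int)
    (st : List (Int × Int × Int) × Option Int × Int × Int)
    (rec : List (String × Int)) : List (Int × Int × Int) × Option Int × Int × Int :=
  let v := pvKeyB rec field
  let st' : List (Int × Int × Int) × Int × Int × Int :=
    match st.2.1 with
    | none => (st.1, v, st.2.2.1, st.2.2.2)
    | some s =>
      if s + period ≤ v then
        (st.1 ++ [(s, st.2.2.1, st.2.2.2)],
         s + period * PySem.Int.floordiv (v - s) period, 0, 0)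
      else (st.1, s, st.2.2.1, st.2.2.2)
  (st'.1, some st'.2.1, st'.2.2.1 + 1, st'.2.2.2 + pvKeyB rec "pkt_size")

-- the inner loop of pass 2: zero buckets for the gap between starts s < nxt
def pvZerosB (field : String) (period s nxt : Int) : List (List (String × Int)) :=
  (PySem.List.pyRange 1 (PySem.Int.floordiv (nxt - s) period) 1).map
    (fun k => pvFrameB field (s + period * k) 0 0)

-- pass 2: zip(buckets, buckets[1:]) loop, then buckets[-1]
def pvPass2B (field : String) (period : Int) (buckets : List (Int × Int × Int)) : List (List (String × Int)) :=
  ((buckets.zip (buckets.drop 1)).foldl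
    (fun out pq => out ++ pvFrameB field pq.1.1 pq.1.2.1 pq.1.2.2 :: pvZerosB field period pq.1.1 pq.2.1) [])
  ++ (match buckets.getLast? with
      | none => []
      | some e => [pvFrameB field e.1 e.2.1 e.2.2])

def aggregate_list_by_frame_number_alt (in_list : List (List (String × Int))) (field : String) (period : Int) : List (List (String × Int)) :=
  let st := in_list.foldl (pvStep1B field period) ([], none, 0, 0)
  let buckets := if 0 < st.2.2.1 then st.1 ++ [(st.2.1.getD 0, st.2.2.1, st.2.2.2)] else st.1
  pvPass2B field period buckets

-- ===== PRECONDITION & SPEC =====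
-- Pre_ excludes where Python A raises — a record missing the field or 'pkt_size'
-- key (KeyError), period = 0 with a nonempty list (ZeroDivisionError) — and
-- restricts nonempty inputs to period ≥ 1, the natural domain of period-
-- bucketing: with a negative period A's threshold fires on every record and the
-- bucket starts drift downward, an accident of the threshold arithmetic.
def Pre_aggregate_list_by_frame_number (in_list : List (List (String × Int))) (field : String) (period : Int) : Prop :=
  (∀ r ∈ in_list, (r.find? (fun q => q.1 == field)).isSome = true ∧
      (r.find? (fun q => q.1 == "pkt_size")).isSome = true)
  ∧ (in_list = [] ∨ 1 ≤ period)
instance (in_list : List (List (String × Int))) (field : String) (period : Int) : Decidable (Pre_aggregate_list_by_frame_number in_list field period) := by unfold Pre_aggregate_list_by_frame_number; infer_instance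
def pvWitness_aggregate_list_by_frame_number : (List (List (String × Int))) × String × Int :=
  ([[("f", 0), ("pkt_size", 10)], [("f", 3), ("pkt_size", 7)]], "f", 1)

def Spec_aggregate_list_by_frame_number (in_list : List (List (String × Int))) (field : String) (period : Int) (out : List (List (String × Int))) : Prop := out = aggregate_list_by_frame_number_alt in_list field period
instance (in_list : List (List (String × Int))) (field : String) (period : Int) (out : List (List (String × Int))) : Decidable (Spec_aggregate_list_by_frame_number in_list field period out) := by unfold Spec_aggregate_list_by_frame_number; infer_instance

-- ===== CLAIM (what is proved, stated in full; the proofs are below) =====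
def Claim_equal_aggregate_list_by_frame_number : Prop := ∀ (in_list : List (List (String × Int))) (field : String) (period : Int), Dom_aggregate_list_by_frame_number in_list field period → Pre_aggregate_list_by_frame_number in_list field period → Spec_aggregate_list_by_frame_number in_list field period (aggregate_list_by_frame_number in_list field period)

-- ===== LEMMAS AND PROOFS =====

-- the two sides share the record-lookup and frame-dict helpers verbatim
theorem pvKey_eq : pvKeyB = pvKeyA := rfl
theorem pvFrame_eq : pvFrameB = pvFrameA := rfl

-- what A's frame_list looks like mid-loop, as a function of B's buckets and the
-- current last_agg_value: each bucket is rendered followed by its gap's zeros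
def pvRender (field : String) (period : Int) : List (Int × Int × Int) → Int → List (List (String × Int))
  | [], _ => []
  | [e], last => pvFrameA field e.1 e.2.1 e.2.2 :: pvZerosB field period e.1 last
  | e :: e' :: rest, last =>
      (pvFrameA field e.1 e.2.1 e.2.2 :: pvZerosB field period e.1 e'.1)
        ++ pvRender field period (e' :: rest) last

theorem pvRender_nil (field : String) (period L : Int) :
    pvRender field period [] L = [] := rfl
theorem pvRender_single (field : String) (period L : Int) (e : Int × Int × Int) :
    pvRender field period [e] L
      = pvFrameA field e.1 e.2.1 e.2.2 :: pvZerosB field period e.1 L := rfl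
theorem pvRender_cons₂ (field : String) (period L : Int) (e e' : Int × Int × Int)
    (t : List (Int × Int × Int)) :
    pvRender field period (e :: e' :: t) L
      = (pvFrameA field e.1 e.2.1 e.2.2 :: pvZerosB field period e.1 e'.1)
          ++ pvRender field period (e' :: t) L := rfl

theorem pvRender_append (field : String) (period : Int) (es : List (Int × Int × Int))
    (e : Int × Int × Int) (L : Int) :
    pvRender field period (es ++ [e]) L
      = pvRender field period es e.1
          ++ pvFrameA field e.1 e.2.1 e.2.2 :: pvZerosB field period e.1 L := by
  induction es with
  | nil => simp [pvRender_nil, pvRender_single]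
  | cons a t ih =>
    cases t with
    | nil => rw [List.cons_append, List.nil_append, pvRender_cons₂, pvRender_single, pvRender_single]
    | cons b t' =>
      rw [List.cons_append, List.cons_append, pvRender_cons₂, ← List.cons_append, ih,
        pvRender_cons₂]
      simp

theorem pvFloordiv_mul_cancel (period q : Int) (hp : period ≠ 0) :
    PySem.Int.floordiv (period * q) period = q := by
  have h : PySem.Int.floordiv (period * q) period = Int.fdiv (period * q) period := by
    simp [PySem.Int.floordiv]
  rw [h, Int.mul_fdiv_cancel_left _ hp]

theorem pvPass2B_flat (field : String) (period : Int) (buckets : List (Int × Int × Int)) :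
    pvPass2B field period buckets
      = (buckets.zip (buckets.drop 1)).flatMap
          (fun pq => pvFrameA field pq.1.1 pq.1.2.1 pq.1.2.2
            :: pvZerosB field period pq.1.1 pq.2.1)
        ++ (match buckets.getLast? with
            | none => []
            | some e => [pvFrameA field e.1 e.2.1 e.2.2]) := by
  rw [pvPass2B, PySem.List.foldl_append_eq_flatMap, List.nil_append, pvFrame_eq]

theorem pvPass2B_eq_render (field : String) (period : Int) (es : List (Int × Int × Int))
    (e : Int × Int × Int) :
    pvPass2B field period (es ++ [e])
      = pvRender field period es e.1 ++ [pvFrameA field e.1 e.2.1 e.2.2] := by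
  induction es with
  | nil =>
    rw [List.nil_append, pvPass2B_flat, pvRender_nil]
    simp
  | cons a t ih =>
    cases t with
    | nil =>
      rw [pvPass2B_flat, pvRender_single]
      simp
    | cons b t' =>
      rw [pvPass2B_flat] at ih ⊢
      rw [pvRender_cons₂]
      simp only [List.cons_append, List.drop_succ_cons, List.drop_zero,
        List.zip_cons_cons, List.flatMap_cons, List.getLast?_cons_cons] at ih ⊢
      rw [List.append_assoc, ih]
      simp

-- A's inner zero loop, as an appended map
theorem pvInnerLoop (field : String) (period : Int) (m : Nat) :
    ∀ (frames : List (List (String × Int))) (l0 : Int),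
    (PySem.List.pyRange 0 (m : Int) 1).foldl
        (fun (q : List (List (String × Int)) × Int) _ =>
          (q.1 ++ [pvFrameA field (q.2 + period) 0 0], q.2 + period)) (frames, l0)
      = (frames ++ (PySem.List.pyRange 1 ((m : Int) + 1) 1).map
            (fun k => pvFrameA field (l0 + period * k) 0 0),
         l0 + period * m) := by
  induction m with
  | zero =>
    intro frames l0
    simp [PySem.List.pyRange_one_eq_nil (le_refl (0:Int)),
      PySem.List.pyRange_one_eq_nil (le_refl (1:Int))]
  | succ m ih =>
    intro frames l0
    have h1 : ((m + 1 : Nat) : Int) = (m : Int) + 1 := by push_cast; ring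
    rw [h1, PySem.List.pyRange_one_succ_right (by positivity : (0:Int) ≤ (m:Int)),
      List.foldl_append, ih frames l0]
    rw [PySem.List.pyRange_one_succ_right (by omega : (1:Int) ≤ (m:Int) + 1)]
    simp only [List.foldl_cons, List.foldl_nil, List.map_append, List.map_cons, List.map_nil]
    have h2 : l0 + period * ↑m + period = l0 + period * (↑m + 1) := by ring
    rw [h2]
    simp

theorem pvRange_toNat (z : Int) :
    PySem.List.pyRange 0 z 1 = PySem.List.pyRange 0 (z.toNat : Int) 1 := by
  by_cases h : 0 ≤ z
  · rw [Int.toNat_of_nonneg h]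
  · rw [PySem.List.pyRange_one_eq_nil (by omega : z ≤ 0),
      PySem.List.pyRange_one_eq_nil (by omega : ((z.toNat : Int)) ≤ 0)]

-- the dump arithmetic: B's floor-division advance is A's zero count plus one
theorem pvAdvance_eq (period delta : Int) (hp : 1 ≤ period) (h : period ≤ delta) :
    PySem.Int.floordiv delta period
      = ((PySem.Int.truncdiv (delta - period) period).toNat : Int) + 1 := by
  have hn : 0 ≤ delta - period := by omega
  have ht : PySem.Int.truncdiv (delta - period) period = (delta - period) / period := by
    simp [PySem.Int.truncdiv, Int.tdiv_eq_ediv_of_nonneg hn]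
  have hnn : 0 ≤ (delta - period) / period := Int.ediv_nonneg hn (by omega)
  rw [ht, Int.toNat_of_nonneg hnn,
    PySem.Int.floordiv_eq_ediv_of_pos (by omega : (0:Int) < period)]
  have h2 : delta = (delta - period) + 1 * period := by ring
  rw [h2, Int.add_mul_ediv_right _ _ (by omega : period ≠ 0)]
  ring_nf

-- B's pass-2 zeros for one gap are exactly A's inner-loop zeros
theorem pvZerosB_eq (field : String) (period s : Int) (m : Nat) (hp : period ≠ 0) :
    pvZerosB field period s (s + period * ((m : Int) + 1))
      = (PySem.List.pyRange 1 ((m : Int) + 1) 1).map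
          (fun k => pvFrameA field (s + period * k) 0 0) := by
  have hg : s + period * ((m : Int) + 1) - s = period * ((m : Int) + 1) := by ring
  rw [pvZerosB, hg, pvFloordiv_mul_cancel _ _ hp, pvFrame_eq]

-- main loop invariant: A's fold state is the rendering of B's fold state
theorem pvInv (field : String) (period : Int) (hp : 1 ≤ period) :
    ∀ (recs : List (List (String × Int))) (buckets : List (Int × Int × Int))
      (last cf cb : Int),
    ∃ ev' l' cf' cb',
      List.foldl (pvStep1B field period) (buckets, some last, cf, cb) recs
        = (ev', some l', cf', cb') ∧
      List.foldl (pvStepA field period)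
          (pvRender field period buckets last, some last, cf, cb) recs
        = (pvRender field period ev' l', some l', cf', cb') := by
  intro recs
  induction recs with
  | nil => intro buckets last cf cb; exact ⟨buckets, last, cf, cb, rfl, rfl⟩
  | cons r recs ih =>
    intro buckets last cf cb
    simp only [List.foldl_cons]
    by_cases h : last + period ≤ pvKeyA r field
    · -- the threshold fires: dump + zero-fill (A) / close the bucket (B)
      have hdelta : period ≤ pvKeyA r field - last := by omega
      have hstep := pvAdvance_eq period (pvKeyA r field - last) hp hdelta
      set m : Nat := (PySem.Int.truncdiv (pvKeyA r field - last - period) period).toNat with hm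
      have hB : pvStep1B field period (buckets, some last, cf, cb) r
          = (buckets ++ [(last, cf, cb)], some (last + period * ((m : Int) + 1)),
             0 + 1, 0 + pvKeyA r "pkt_size") := by
        simp only [pvStep1B, pvKey_eq]
        rw [if_pos h, hstep]
      have hA : pvStepA field period
            (pvRender field period buckets last, some last, cf, cb) r
          = (pvRender field period (buckets ++ [(last, cf, cb)])
                (last + period * ((m : Int) + 1)),
             some (last + period * ((m : Int) + 1)), 0 + 1, 0 + pvKeyA r "pkt_size") := by
        simp only [pvStepA, Option.getD_some]
        rw [if_pos h, pvRange_toNat, ← hm,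
          pvInnerLoop field period m
            (pvRender field period buckets last ++ [pvFrameA field last cf cb]) last,
          pvRender_append, pvZerosB_eq field period last m (by omega)]
        have h2 : last + period * ↑m + period = last + period * ((m:Int) + 1) := by ring
        rw [h2]
        simp
      rw [hB, hA]
      exact ih (buckets ++ [(last, cf, cb)]) (last + period * ((m : Int) + 1))
        (0 + 1) (0 + pvKeyA r "pkt_size")
    · -- no dump: both sides only accumulate the packet
      have hB : pvStep1B field period (buckets, some last, cf, cb) r
          = (buckets, some last, cf + 1, cb + pvKeyA r "pkt_size") := by
        simp only [pvStep1B, pvKey_eq]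
        rw [if_neg h]
      have hA : pvStepA field period
            (pvRender field period buckets last, some last, cf, cb) r
          = (pvRender field period buckets last, some last, cf + 1, cb + pvKeyA r "pkt_size") := by
        simp only [pvStepA, Option.getD_some]
        rw [if_neg h]
      rw [hB, hA]
      exact ih buckets last (cf + 1) (cb + pvKeyA r "pkt_size")

theorem pvStep_cf (field : String) (period : Int)
    (st : List (Int × Int × Int) × Option Int × Int × Int)
    (rec : List (String × Int)) (h : 0 ≤ st.2.2.1) :
    1 ≤ (pvStep1B field period st rec).2.2.1 := by
  obtain ⟨ev, lastO, cf, cb⟩ := st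
  simp only [pvStep1B] at *
  cases lastO <;> dsimp only <;> [skip; split] <;> simp <;> omega

theorem pvCf (field : String) (period : Int) :
    ∀ (recs : List (List (String × Int))) (st : List (Int × Int × Int) × Option Int × Int × Int),
      1 ≤ st.2.2.1 → 1 ≤ (List.foldl (pvStep1B field period) st recs).2.2.1 := by
  intro recs
  induction recs with
  | nil => intro st h; exact h
  | cons r recs ih =>
    intro st h
    exact ih _ (pvStep_cf field period st r (by omega))

-- ===== VERDICT (by name: the statement is the Claim_ definition above) =====
theorem aggregate_list_by_frame_number_spec : Claim_equal_aggregate_list_by_frame_number := by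
  intro in_list field period _hdom hpre
  unfold Spec_aggregate_list_by_frame_number
  cases in_list with
  | nil => rfl
  | cons r recs =>
    have hp : 1 ≤ period := by
      rcases hpre.2 with h | h
      · exact absurd h (by simp)
      · exact h
    -- the first record: A sets last = v and its threshold cannot fire; B sets start = v
    have hA1 : pvStepA field period ([], none, 0, 0) r
        = ([], some (pvKeyA r field), 0 + 1, 0 + pvKeyA r "pkt_size") := by
      simp only [pvStepA, Option.getD_none]
      rw [if_neg (by omega : ¬ pvKeyA r field + period ≤ pvKeyA r field)]
    have hB1 : pvStep1B field period ([], none, 0, 0) r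
        = ([], some (pvKeyA r field), 0 + 1, 0 + pvKeyA r "pkt_size") := by
      simp only [pvStep1B, pvKey_eq]
    obtain ⟨ev', l', cf', cb', hB, hA⟩ :=
      pvInv field period hp recs [] (pvKeyA r field) (0 + 1) (0 + pvKeyA r "pkt_size")
    rw [pvRender_nil] at hA
    have hcf : 1 ≤ cf' := by
      have h1 : 1 ≤ (List.foldl (pvStep1B field period)
          (([], some (pvKeyA r field), 0 + 1, 0 + pvKeyA r "pkt_size") :
            List (Int × Int × Int) × Option Int × Int × Int) recs).2.2.1 :=
        pvCf field period recs _ (by simp)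
      rw [hB] at h1
      exact h1
    simp only [aggregate_list_by_frame_number, aggregate_list_by_frame_number_alt,
      List.foldl_cons]
    rw [hA1, hB1, hA, hB]
    simp only [Option.getD_some, if_pos (by omega : (0:Int) < cf')]
    rw [pvPass2B_eq_render field period ev' (l', cf', cb')]
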